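-- pv_equiv track=rewrite | github.com/junman95/Algorithm | Algorithms/NAVER_WEBTOON/test3.py | solution
-- ===== SOURCE A (Python) =====
-- def solution(letters, k):
--     answer = list()
--
--     #letter_enum = enumerate(letters)
--     letter_list = list(letters)
--     letter_list.sort()
--     letter_list = letter_list[-1:-k-1:-1]
--
--     for idx in letter_list:
--         for i in range(len(letters)):
--             if idx == letters[i]:
--                 answer.append((i,idx))
--                 break
--     answer.sort(key= lambda x:x[0])
--     ans_str= ''
--     for i in range(len(answer)):
--         ans_str += answer[i][1]
--
--     return ans_str
-- ===== SOURCE B (Python) =====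
-- def solution(letters, k):
--     # Count the selected multiset (same reverse slice of the sorted letters as the task uses).
--     cnt = {}
--     for c in sorted(letters)[-1:-k-1:-1]:
--         cnt[c] = cnt.get(c, 0) + 1
--     # One forward pass: at each character's first occurrence emit all its selected copies.
--     seen = set()
--     parts = []
--     for c in letters:
--         if c in cnt and c not in seen:
--             seen.add(c)
--             parts.append(c * cnt[c])
--     return ''.join(parts)
-- ===== Notes on version B (the rewrite author's own statement) =====
-- stated objective: faster
-- what changed: Replaces A's per-selected-character linear scan of the string plus a final sort of (index, char) pairs by a count table of the selected multiset and one forward pass over the string that emits c*cnt[c] at each character's first occurrence.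
import Mathlib
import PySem

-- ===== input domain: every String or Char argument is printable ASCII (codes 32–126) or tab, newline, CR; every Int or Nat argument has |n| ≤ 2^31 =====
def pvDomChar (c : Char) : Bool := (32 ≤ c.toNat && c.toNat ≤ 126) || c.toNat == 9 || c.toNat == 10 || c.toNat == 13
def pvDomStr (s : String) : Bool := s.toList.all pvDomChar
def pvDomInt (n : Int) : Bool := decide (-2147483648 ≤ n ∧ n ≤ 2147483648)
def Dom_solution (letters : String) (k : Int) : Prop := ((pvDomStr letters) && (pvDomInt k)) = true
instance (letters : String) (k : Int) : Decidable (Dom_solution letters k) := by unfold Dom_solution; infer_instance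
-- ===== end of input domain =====

-- B replaces A's per-selected-character scan plus final index sort by a count table of the
-- selected multiset and one forward pass emitting each char's copies at its first occurrence.

-- ===== PORT A =====
-- inner 'for i in range(len(letters)): if idx == letters[i]: answer.append((i,idx)); break'
def innerA (s : List Char) (idx : Char) (i : Nat) : List (Int × Char) :=
  if h : i < s.length then
    if idx == s[i] then [((i : Int), idx)] else innerA s idx (i + 1)
  else []
termination_by s.length - i

def solution (letters : String) (k : Int) : String :=
  let letterList0 := letters.toList
  let letterList1 := PySem.List.sorted letterList0 (fun c => c) false
  let letterList := (PySem.List.slice? letterList1 (some (-1)) (some (-k - 1)) (-1)).getD []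
  let answer := letterList.foldl (fun acc idx => acc ++ innerA letters.toList idx 0) []
  let answer2 := PySem.List.sorted answer (fun x => x.1) false
  let ansStr := (PySem.List.pyRange 0 (answer2.length : Int) 1).foldl
    (fun acc i => acc ++ [(PySem.List.pyGetD answer2 i ((0 : Int), 'a')).2]) ([] : List Char)
  String.ofList ansStr

-- ===== PORT B =====
def solution_alt (letters : String) (k : Int) : String :=
  let cnt := ((PySem.List.slice? (PySem.List.sorted letters.toList (fun c => c) false)
      (some (-1)) (some (-k - 1)) (-1)).getD []).foldl
    (fun d c => d.insert c (d.getD c 0 + 1)) (PySem.Dict.empty)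
  let st := letters.toList.foldl
    (fun (st : PySem.Set Char × List (List Char)) c =>
      if cnt.contains c && !st.1.contains c then
        (st.1.add c, st.2 ++ [PySem.List.pyRepeat [c] (cnt.getD c 0)])
      else st)
    (PySem.Set.empty, [])
  String.ofList st.2.flatten

-- ===== PRECONDITION & SPEC =====
def Spec_solution (letters : String) (k : Int) (out : String) : Prop := out = solution_alt letters k
instance (letters : String) (k : Int) (out : String) : Decidable (Spec_solution letters k out) := by unfold Spec_solution; infer_instance

-- ===== CLAIM (what is proved, stated in full; the proofs are below) =====
def Claim_equal_solution : Prop := ∀ (letters : String) (k : Int), Dom_solution letters k → Spec_solution letters k (solution letters k)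

-- ===== LEMMAS AND PROOFS =====

theorem mem_of_slice?_eq_some {α : Type} (xs l : List α) (a b : Option Int) (st : Int)
    (h : PySem.List.slice? xs a b st = some l) (x : α) (hx : x ∈ l) : x ∈ xs := by
  unfold PySem.List.slice? at h
  split_ifs at h
  rcases hmatch : PySem.List.sliceIndices xs.length a b st with ⟨s, e, stp⟩
  rw [hmatch] at h
  simp only [Option.some.injEq] at h
  subst h
  rcases List.mem_filterMap.mp hx with ⟨k, _, hk⟩
  exact List.mem_of_getElem? hk

theorem innerA_spec (s : List Char) (c : Char) : ∀ (i : Nat), c ∈ s.drop i →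
    innerA s c i = [(((i + (s.drop i).idxOf c : Nat) : Int), c)] := by
  intro i
  induction hfuel : s.length - i using Nat.strong_induction_on generalizing i with
  | _ n ih =>
    intro hmem
    have hi : i < s.length := by
      by_contra hge
      rw [List.drop_eq_nil_of_le (by omega)] at hmem
      simp at hmem
    have hdrop : s.drop i = s[i] :: s.drop (i + 1) := List.drop_eq_getElem_cons hi
    rw [innerA]
    rw [dif_pos hi]
    by_cases hc : c = s[i]
    · rw [if_pos (by simp [hc])]
      rw [hdrop, ← hc]
      simp [List.idxOf_cons_self]
    · rw [if_neg (by simp [hc])]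
      have hmem' : c ∈ s.drop (i + 1) := by
        rw [hdrop] at hmem
        rcases List.mem_cons.mp hmem with h | h
        · exact (hc h).elim
        · exact h
      subst hfuel
      rw [ih (s.length - (i + 1)) (by omega) (i + 1) rfl hmem']
      have hidx : (s.drop i).idxOf c = (s.drop (i + 1)).idxOf c + 1 := by
        rw [hdrop]
        exact List.idxOf_cons_ne _ (fun h => hc h.symm)
      rw [hidx]
      norm_num
      ring

theorem update_spec (l : List Char) : ∀ (seen : List Char), ∃ rest,
    PySem.Set.update seen l = seen ++ rest ∧ (∀ x ∈ rest, x ∈ l ∧ x ∉ seen) ∧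
    rest.Pairwise (fun a b => l.idxOf a < l.idxOf b) := by
  induction l with
  | nil => intro seen; exact ⟨[], by simp [PySem.Set.update], by simp, by simp⟩
  | cons c t ih =>
    intro seen
    have hupd : PySem.Set.update seen (c :: t) = PySem.Set.update (PySem.Set.add seen c) t := by
      simp [PySem.Set.update]
    by_cases hc : c ∈ seen
    · have hadd : PySem.Set.add seen c = seen := by simp [PySem.Set.add, hc]
      rcases ih seen with ⟨rest, h1, h2, h3⟩
      refine ⟨rest, by rw [hupd, hadd, h1], ?_, ?_⟩
      · intro x hx
        rcases h2 x hx with ⟨hxt, hxs⟩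
        exact ⟨List.mem_cons_of_mem _ hxt, hxs⟩
      · refine h3.imp_of_mem ?_
        intro a b ha hb hab
        have hane : a ≠ c := fun h => (h2 a ha).2 (h ▸ hc)
        have hbne : b ≠ c := fun h => (h2 b hb).2 (h ▸ hc)
        rw [List.idxOf_cons_ne _ (fun h => hane h.symm), List.idxOf_cons_ne _ (fun h => hbne h.symm)]
        omega
    · have hadd : PySem.Set.add seen c = seen ++ [c] := by simp [PySem.Set.add, hc]
      rcases ih (seen ++ [c]) with ⟨rest, h1, h2, h3⟩
      refine ⟨c :: rest, ?_, ?_, ?_⟩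
      · rw [hupd, hadd, h1]; simp
      · intro x hx
        rcases List.mem_cons.mp hx with h | h
        · subst h; exact ⟨List.mem_cons_self, hc⟩
        · rcases h2 x h with ⟨hxt, hxs⟩
          exact ⟨List.mem_cons_of_mem _ hxt, fun hmem => hxs (by simp [hmem])⟩
      · constructor
        · intro b hb
          have hbne : b ≠ c := fun h => (h2 b hb).2 (by simp [h])
          rw [List.idxOf_cons_self, List.idxOf_cons_ne _ (fun h => hbne h.symm)]
          omega
        · refine h3.imp_of_mem ?_
          intro a b ha hb hab
          have hane : a ≠ c := fun h => (h2 a ha).2 (by simp [h])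
          have hbne : b ≠ c := fun h => (h2 b hb).2 (by simp [h])
          rw [List.idxOf_cons_ne _ (fun h => hane h.symm), List.idxOf_cons_ne _ (fun h => hbne h.symm)]
          omega

theorem filter_idxOf_lt (q : Char → Bool) : ∀ (s : List Char) (a b : Char), a ≠ b →
    a ∈ s.filter q → b ∈ s.filter q →
    (s.filter q).idxOf a < (s.filter q).idxOf b → s.idxOf a < s.idxOf b := by
  intro s
  induction s with
  | nil => intro a b _ ha; simp at ha
  | cons c t ih =>
    intro a b hne ha hb hlt
    by_cases hca : c = a
    · subst hca
      have hbt : b ∈ t := by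
        have : b ∈ (c :: t).filter q := hb
        have hbm : b ∈ c :: t := List.mem_of_mem_filter this
        rcases List.mem_cons.mp hbm with h | h
        · exact (hne h.symm).elim
        · exact h
      rw [List.idxOf_cons_self, List.idxOf_cons_ne _ hne]
      omega
    · by_cases hcb : c = b
      · subst hcb
        have hqc : q c = true := List.of_mem_filter hb
        rw [List.filter_cons_of_pos hqc] at ha hb hlt
        rw [List.idxOf_cons_self] at hlt
        exact absurd hlt (Nat.not_lt_zero _)
      · have hat : a ∈ t.filter q := by
          by_cases hqc : q c = true
          · rw [List.filter_cons_of_pos hqc] at ha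
            rcases List.mem_cons.mp ha with h | h
            · exact (hca h.symm).elim
            · exact h
          · rw [List.filter_cons_of_neg (by simpa using hqc)] at ha; exact ha
        have hbt : b ∈ t.filter q := by
          by_cases hqc : q c = true
          · rw [List.filter_cons_of_pos hqc] at hb
            rcases List.mem_cons.mp hb with h | h
            · exact (hcb h.symm).elim
            · exact h
          · rw [List.filter_cons_of_neg (by simpa using hqc)] at hb; exact hb
        have hlt' : (t.filter q).idxOf a < (t.filter q).idxOf b := by
          by_cases hqc : q c = true
          · rw [List.filter_cons_of_pos hqc,
              List.idxOf_cons_ne _ (fun h => hca h),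
              List.idxOf_cons_ne _ (fun h => hcb h)] at hlt
            omega
          · rwa [List.filter_cons_of_neg (by simpa using hqc)] at hlt
        have := ih a b hne hat hbt hlt'
        rw [List.idxOf_cons_ne _ (fun h => hca h), List.idxOf_cons_ne _ (fun h => hcb h)]
        omega

theorem perm_flatMap_replicate_count : ∀ (d sel : List Char), d.Nodup →
    (∀ x ∈ sel, x ∈ d) →
    (d.flatMap fun c => List.replicate (sel.count c) c).Perm sel := by
  intro d
  induction d with
  | nil =>
    intro sel _ hsub
    have : sel = [] := by
      cases sel with
      | nil => rfl
      | cons x t => exact absurd (hsub x List.mem_cons_self) (List.not_mem_nil)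
    simp [this]
  | cons c d' ih =>
    intro sel hnd hsub
    rw [List.flatMap_cons]
    have hcd' : c ∉ d' := (List.nodup_cons.mp hnd).1
    have hrest : (d'.flatMap fun e => List.replicate (sel.count e) e) =
        (d'.flatMap fun e => List.replicate ((sel.filter (fun x => !(x == c))).count e) e) := by
      apply List.flatMap_congr
      intro e he
      have hec : e ≠ c := fun h => hcd' (h ▸ he)
      rw [List.count_filter (by simp [hec])]
    rw [hrest]
    have hih : (d'.flatMap fun e =>
        List.replicate ((sel.filter (fun x => !(x == c))).count e) e).Perm
        (sel.filter (fun x => !(x == c))) := by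
      apply ih _ (List.nodup_cons.mp hnd).2
      intro x hx
      have hxs : x ∈ sel := List.mem_of_mem_filter hx
      have hxc : x ≠ c := by
        have := List.of_mem_filter hx
        simpa using this
      rcases List.mem_cons.mp (hsub x hxs) with h | h
      · exact (hxc h).elim
      · exact h
    have hrep : List.replicate (sel.count c) c = sel.filter (fun x => x == c) := by
      rw [List.filter_beq]
    rw [hrep]
    exact ((List.filter_append_perm _ sel).symm.trans
      ((hih.append_left _).symm)).symm

theorem eq_of_perm_pairwise_inj {α κ : Type} [LinearOrder κ] (key : α → κ) :
    ∀ (l₁ l₂ : List α), l₁.Perm l₂ →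
    l₁.Pairwise (fun a b => key a ≤ key b) → l₂.Pairwise (fun a b => key a ≤ key b) →
    (∀ a ∈ l₁, ∀ b ∈ l₁, key a = key b → a = b) → l₁ = l₂ := by
  intro l₁
  induction l₁ with
  | nil => intro l₂ hp _ _ _; exact (hp.nil_eq).symm ▸ rfl
  | cons h t ih =>
    intro l₂ hp hpw1 hpw2 hinj
    cases l₂ with
    | nil => exact absurd hp.symm.nil_eq (by simp)
    | cons h' t' =>
      have hh'mem : h' ∈ h :: t := hp.symm.subset List.mem_cons_self
      have hhmem : h ∈ h' :: t' := hp.subset List.mem_cons_self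
      have hle1 : key h ≤ key h' := by
        rcases List.mem_cons.mp hh'mem with he | he
        · rw [he]
        · exact (List.pairwise_cons.mp hpw1).1 _ he
      have hle2 : key h' ≤ key h := by
        rcases List.mem_cons.mp hhmem with he | he
        · rw [he]
        · exact (List.pairwise_cons.mp hpw2).1 _ he
      have hkey : key h = key h' := le_antisymm hle1 hle2
      have heq : h = h' := hinj h List.mem_cons_self h' hh'mem hkey
      subst heq
      have htp : t.Perm t' := hp.cons_inv
      have := ih t' htp (List.pairwise_cons.mp hpw1).2 (List.pairwise_cons.mp hpw2).2
        (fun a ha b hb => hinj a (List.mem_cons_of_mem _ ha) b (List.mem_cons_of_mem _ hb))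
      rw [this]

def runB (q : Char → Bool) (h : Char → List Char) : List Char → PySem.Set Char → List (List Char)
  | [], _ => []
  | c :: t, seen =>
    if q c && !seen.contains c then h c :: runB q h t (seen.add c) else runB q h t seen

theorem foldB_eq_runB (q : Char → Bool) (h : Char → List Char) : ∀ (l : List Char)
    (seen : PySem.Set Char) (parts : List (List Char)),
    (l.foldl (fun st c => if q c && !st.1.contains c then (st.1.add c, st.2 ++ [h c]) else st)
      (seen, parts)) = (PySem.Set.update seen (l.filter q), parts ++ runB q h l seen) := by
  intro l
  induction l with
  | nil => intro seen parts; simp [runB, PySem.Set.update]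
  | cons c t ih =>
    intro seen parts
    rw [List.foldl_cons, runB]
    by_cases hq : q c = true
    · by_cases hcm : c ∈ seen
      · have hc : seen.contains c = true := by simpa using hcm
        rw [if_neg (by simp [hq, hcm])]
        rw [if_neg (by simp [hq, hcm])]
        rw [ih]
        have hadd : PySem.Set.add seen c = seen := by
          simp [PySem.Set.add, hcm]
        rw [List.filter_cons_of_pos hq]
        simp [PySem.Set.update, hadd]
      · have hc : seen.contains c = true ↔ False := by simpa using hcm
        rw [if_pos (by simp [hq, hcm])]
        rw [if_pos (by simp [hq, hcm])]
        rw [ih]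
        rw [List.filter_cons_of_pos hq]
        simp [PySem.Set.update]
    · rw [if_neg (by simp [hq])]
      rw [if_neg (by simp [hq])]
      rw [ih, List.filter_cons_of_neg (by simpa using hq)]

theorem runB_eq_map (q : Char → Bool) (h : Char → List Char) : ∀ (l : List Char)
    (seen : PySem.Set Char),
    runB q h l seen = ((PySem.Set.update seen (l.filter q)).drop seen.length).map h := by
  intro l
  induction l with
  | nil => intro seen; simp [runB, PySem.Set.update]
  | cons c t ih =>
    intro seen
    rw [runB]
    by_cases hq : q c = true
    · by_cases hcm : c ∈ seen
      · have hc : seen.contains c = true := by simpa using hcm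
        rw [if_neg (by simp [hq, hcm])]
        rw [ih]
        have hadd : PySem.Set.add seen c = seen := by simp [PySem.Set.add, hcm]
        rw [List.filter_cons_of_pos hq]
        simp [PySem.Set.update, hadd]
      · have hc : seen.contains c = true ↔ False := by simpa using hcm
        rw [if_pos (by simp [hq, hcm])]
        have hadd : PySem.Set.add seen c = seen ++ [c] := by simp [PySem.Set.add, hcm]
        rw [ih]
        rw [List.filter_cons_of_pos hq]
        have hupd : PySem.Set.update seen (c :: t.filter q)
            = PySem.Set.update (seen ++ [c]) (t.filter q) := by
          simp [PySem.Set.update, hadd]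
        rw [hupd, hadd]
        rcases update_spec (t.filter q) (seen ++ [c]) with ⟨rest, h1, _, _⟩
        rw [h1]
        simp
    · rw [if_neg (by simp [hq])]
      rw [ih, List.filter_cons_of_neg (by simpa using hq)]

theorem solution_eq_alt (letters : String) (k : Int) :
    solution letters k = solution_alt letters k := by
  obtain ⟨sel, hsel⟩ : ∃ sel, PySem.List.slice?
      (PySem.List.sorted letters.toList (fun c => c) false) (some (-1)) (some (-k - 1)) (-1)
      = some sel := by
    unfold PySem.List.slice?
    rw [if_neg (by norm_num)]
    rcases PySem.List.sliceIndices (PySem.List.sorted letters.toList (fun c => c) false).length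
      (some (-1)) (some (-k - 1)) (-1) with ⟨a, b, c⟩
    exact ⟨_, rfl⟩
  set s : List Char := letters.toList with hs
  have hsub : ∀ c ∈ sel, c ∈ s := by
    intro c hc
    exact (PySem.List.mem_sorted s (fun c => c) false c).mp
      (mem_of_slice?_eq_some _ _ _ _ _ hsel c hc)
  -- shared notation
  set f : Char → Int × Char := fun c => ((s.idxOf c : Int), c) with hf
  set q : Char → Bool := fun c => sel.contains c with hq
  set ll : List Char := PySem.List.dedup (s.filter q) with hll
  set chars : List Char := ll.flatMap (fun c => List.replicate (sel.count c) c) with hchars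
  -- ==== A side ====
  have hanswer : sel.foldl (fun acc idx => acc ++ innerA s idx 0) [] = sel.map f := by
    rw [PySem.List.foldl_congr_mem sel _ (fun acc idx => acc ++ [f idx]) []
      (by
        intro acc x hx
        rw [innerA_spec s x 0 (by simpa using hsub x hx)]
        simp [hf])]
    rw [PySem.List.foldl_append_singleton_eq_map]
    simp
  have hllsub : ∀ x ∈ sel, x ∈ ll := by
    intro x hx
    rw [hll]
    rw [PySem.List.mem_dedup]
    refine List.mem_filter.mpr ⟨hsub x hx, ?_⟩
    simp [hq, hx]
  have hllpw : ll.Pairwise (fun a b => s.idxOf a < s.idxOf b) := by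
    rcases update_spec (s.filter q) [] with ⟨rest, h1, h2, h3⟩
    have hrest : rest = ll := by
      rw [hll]
      have : PySem.List.dedup (s.filter q) = PySem.Set.update [] (s.filter q) := rfl
      rw [this, h1]
      simp
    rw [← hrest]
    refine h3.imp_of_mem ?_
    intro a b ha hb hab
    have hane : a ≠ b := by
      intro h
      subst h
      omega
    exact filter_idxOf_lt q s a b hane (h2 a ha).1 (h2 b hb).1 hab
  have hsorted : PySem.List.sorted (sel.map f) (fun x => x.1) false = chars.map f := by
    apply eq_of_perm_pairwise_inj (fun x : Int × Char => x.1)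
    · refine (PySem.List.sorted_perm _ _ _).trans ?_
      refine ((perm_flatMap_replicate_count ll sel
        (by rw [hll]; exact PySem.Set.nodup_ofList _) hllsub).map f).symm.trans ?_
      rw [hchars]
    · exact PySem.List.sorted_pairwise _ _
    · rw [List.pairwise_map]
      rw [hchars, List.pairwise_flatMap]
      constructor
      · intro a _
        exact List.pairwise_replicate.mpr (by simp [hf])
      · refine hllpw.imp_of_mem ?_
        intro a b _ _ hab x hx y hy
        have hxa : x = a := List.eq_of_mem_replicate hx
        have hyb : y = b := List.eq_of_mem_replicate hy
        subst hxa; subst hyb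
        simp only [hf]
        exact_mod_cast Int.ofNat_le.mpr (Nat.le_of_lt hab)
    · intro a ha b hb hkey
      have hmem : ∀ x ∈ PySem.List.sorted (sel.map f) (fun x : Int × Char => x.1) false,
          ∃ c ∈ sel, x = f c := by
        intro x hx
        have := (PySem.List.mem_sorted _ _ _ x).mp hx
        rcases List.mem_map.mp this with ⟨c, hc, hfc⟩
        exact ⟨c, hc, hfc.symm⟩
      rcases hmem a ha with ⟨ca, hca, rfl⟩
      rcases hmem b hb with ⟨cb, hcb, rfl⟩
      simp only [hf] at hkey ⊢
      have hia : s.idxOf ca = s.idxOf cb := by exact_mod_cast hkey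
      have hcaeq : ca = cb := by
        have h1 : s.idxOf ca < s.length := List.idxOf_lt_length_of_mem (hsub ca hca)
        have h2 : s.idxOf cb < s.length := List.idxOf_lt_length_of_mem (hsub cb hcb)
        have e1 : s[s.idxOf ca] = ca := List.getElem_idxOf h1
        have e2 : s[s.idxOf cb] = cb := List.getElem_idxOf h2
        rw [← e1, ← e2]
        congr 1
      rw [hcaeq]
  -- A's value
  have hA : solution letters k = String.ofList (chars.map f |>.map (fun x => x.2)) := by
    unfold solution
    simp only [← hs, hsel, Option.getD_some, hanswer, hsorted]
    congr 1
    rw [PySem.List.foldl_pyRange_zero_pyGetD' _ ((0 : Int), 'a')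
      (fun acc x => acc ++ [x.2]) []]
    rw [PySem.List.foldl_append_singleton_eq_map]
    simp
  have hAchars : (chars.map f).map (fun x : Int × Char => x.2) = chars := by
    rw [List.map_map]
    have : (fun x : Int × Char => x.2) ∘ f = id := by
      funext c; simp [hf]
    rw [this, List.map_id]
  -- ==== B side ====
  have hB : solution_alt letters k = String.ofList chars := by
    unfold solution_alt
    simp only [← hs, hsel, Option.getD_some]
    set cnt := sel.foldl (fun d c => d.insert c (d.getD c 0 + 1))
      (PySem.Dict.empty : PySem.Dict Char Int) with hcnt
    have hqc : ∀ c, cnt.contains c = q c := by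
      intro c
      have hkeys : cnt.keys = PySem.Set.ofList sel := by
        rw [hcnt, PySem.Dict.keys_foldl_insert]
        rfl
      have h1 : cnt.contains c = true ↔ c ∈ sel := by
        rw [PySem.Dict.contains_iff_mem_keys, hkeys, PySem.Set.mem_ofList]
      have h2 : q c = true ↔ c ∈ sel := by simp [hq]
      by_cases hcs : c ∈ sel
      · rw [(h1.mpr hcs), (h2.mpr hcs).symm]
      · have := fun h => hcs (h1.mp h)
        have := fun h => hcs (h2.mp h)
        cases hb1 : cnt.contains c <;> cases hb2 : q c <;> simp_all
    have hgetD : ∀ c, cnt.getD c 0 = (sel.count c : Int) := by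
      intro c
      rw [hcnt, PySem.Dict.getD_foldl_insert_add_one]
      simp [PySem.Dict.getD, PySem.Dict.get?, PySem.Dict.empty]
    rw [foldB_eq_runB]
    simp only []
    rw [runB_eq_map]
    have hemp : (PySem.Set.empty : PySem.Set Char) = [] := rfl
    rw [hemp]
    simp only [List.length_nil, List.drop_zero]
    have hfilt : s.filter (fun c => cnt.contains c) = s.filter q := by
      apply List.filter_congr
      intro x _
      exact hqc x
    rw [hfilt]
    have hupdeq : PySem.Set.update ([] : List Char) (s.filter q) = ll := rfl
    rw [hupdeq]
    congr 1
    simp only [List.nil_append]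
    rw [← List.flatMap_def]
    rw [hchars]
    apply List.flatMap_congr
    intro c _
    rw [hgetD c]
    rw [PySem.List.pyRepeat_singleton]
    simp
  rw [hA, hB, hAchars]

-- ===== VERDICT (by name: the statement is the Claim_ definition above) =====
theorem solution_spec : Claim_equal_solution := by
  intro letters k _
  unfold Spec_solution
  exact solution_eq_alt letters k
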